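-- pv_equiv track=rewrite | github.com/hyatt-e/USF997 | USF_997.py | split_segs
-- ===== SOURCE A (Python) =====
-- def split_segs(file):
-- 	segments = {}
-- 	line = {}
--
-- 	lines = file.split("~")
--
-- 	for strng in lines:
-- 		seg = strng.split('^')
-- 		if (seg[0] == 'AK2') or (seg[0] == 'AK5'):
-- 			if seg[0] == 'AK2':
-- 				ak2ak5Seg = strng
-- 			elif seg[0] == 'AK5':
-- 				strng = '^' + strng
-- 				ak2ak5Seg += strng
-- 				segments[len(segments)+1] = ak2ak5Seg
-- 		else:
-- 			segments[len(segments)+1] = strng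
--
-- 	for key in segments:
-- 		segNum = 0
-- 		fieldStrg = segments[key].split('^')
-- 		fields = []
--
-- 		for x in fieldStrg:
-- 			x = x.replace(' ', '')
-- 			# fields[segNum] = x
-- 			# necessary to use a dict instead of list??
-- 			fields.append(x)
-- 			segNum += 1
--
-- 		segments[key] = fields
-- 	return segments
-- ===== SOURCE B (Python) =====
-- def split_segs(file):
--     lines = file.split('~')
--     tags = [s.split('^')[0] for s in lines]
--     segments = {}
--     for i in range(len(lines)):
--         if tags[i] == 'AK2':
--             continue
--         if tags[i] == 'AK5':
--             j = max(k for k in range(i) if tags[k] == 'AK2')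
--             s = '^'.join([lines[j]] + [lines[k] for k in range(j + 1, i + 1) if tags[k] == 'AK5'])
--         else:
--             s = lines[i]
--         segments[len(segments) + 1] = [f.replace(' ', '') for f in s.split('^')]
--     return segments
-- ===== Notes on version B (the rewrite author's own statement) =====
-- stated objective: alternative
-- what changed: B keeps no running buffer and no second pass: it precomputes the tag of every '~'-segment, and for each AK5 segment reconstructs the merged string directly from the original segment list (the last AK2 index before it, joined with the AK5 segments up to and including it), emitting each cleaned field list immediately; A instead threads a mutable accumulating buffer through the scan and rewrites every dict entry in a second loop.
import Mathlib
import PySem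

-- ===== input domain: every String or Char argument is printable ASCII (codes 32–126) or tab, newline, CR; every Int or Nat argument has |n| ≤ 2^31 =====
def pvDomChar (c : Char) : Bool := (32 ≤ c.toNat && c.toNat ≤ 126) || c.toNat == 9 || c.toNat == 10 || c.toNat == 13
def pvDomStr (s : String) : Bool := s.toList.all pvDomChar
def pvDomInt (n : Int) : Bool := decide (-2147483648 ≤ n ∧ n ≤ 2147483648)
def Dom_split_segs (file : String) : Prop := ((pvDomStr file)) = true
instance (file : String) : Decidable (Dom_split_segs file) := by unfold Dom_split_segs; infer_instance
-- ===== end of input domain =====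

-- B recomputes each merged AK2/AK5 segment directly from the original line list by index
-- arithmetic (last preceding AK2, then the AK5 lines up to here) instead of A's mutable
-- running buffer and second rewrite pass; objective: alternative.

-- s.split(sep) with a nonempty separator (never raises)
def pvSplit (s sep : String) : List String := (PySem.Str.split? s sep).getD []

-- seg[0] of strng.split('^') (split with a nonempty separator never returns an empty list)
def pvTag (strng : String) : String := (pvSplit strng "^").head?.getD ""

-- ===== PORT A =====

-- one iteration of A's first loop; state = (segments : dict, ak2ak5Seg : Option — none = unbound)
def pvStepA (st : PySem.Dict Int String × Option String) (strng : String) :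
    PySem.Dict Int String × Option String :=
  if pvTag strng == "AK2" then (st.1, some strng)
  else if pvTag strng == "AK5" then
    match st.2 with
    | some b =>
        let s := b ++ "^" ++ strng
        (st.1.insert ((st.1.size : Int) + 1) s, some s)
    | none => st   -- Python raises NameError here; such inputs are outside Pre_split_segs
  else (st.1.insert ((st.1.size : Int) + 1) strng, st.2)

def split_segs (file : String) : List (Int × List String) :=
  let lines := pvSplit file "~"
  let segments := (lines.foldl pvStepA (PySem.Dict.empty, none)).1
  -- second loop: for key in segments: segments[key] = fields  (the value type changes str → list,
  -- so the rewritten dict is rebuilt by the same key iteration; segments[key] = get?.getD "")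
  let result := segments.keys.foldl
    (fun (out : PySem.Dict Int (List String)) key =>
      let fieldStrg := pvSplit ((segments.get? key).getD "") "^"
      let fields := fieldStrg.foldl (fun fs x => fs ++ [PySem.Str.replace x " " ""]) []
      out.insert key fields) PySem.Dict.empty
  result.items

-- ===== PORT B =====

-- '^'.join over a nonempty list (exact for Python's str.join with separator "^")
def pvJoinCaret : List String → String
  | [] => ""
  | [x] => x
  | x :: y :: t => x ++ "^" ++ pvJoinCaret (y :: t)

def split_segs_alt (file : String) : List (Int × List String) :=
  let lines := pvSplit file "~"
  let tags := lines.map (fun s => (pvSplit s "^").head?.getD "")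
  let segments := (List.range lines.length).foldl
    (fun (segments : PySem.Dict Int (List String)) i =>
      if tags[i]! == "AK2" then segments
      else
        let s :=
          if tags[i]! == "AK5" then
            match PySem.List.max? ((List.range i).filter (fun k => tags[k]! == "AK2")) (fun y => y) with
            | some j =>
                pvJoinCaret (lines[j]! ::
                  ((List.range' (j + 1) (i - j)).filter (fun k => tags[k]! == "AK5")).map
                    (fun k => lines[k]!))
            | none => lines[i]!   -- Python's max() raises ValueError here; outside Pre_split_segs
          else lines[i]!
        segments.insert ((segments.size : Int) + 1)
          ((pvSplit s "^").map (fun f => PySem.Str.replace f " " "")))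
    PySem.Dict.empty
  segments.items

-- ===== PRECONDITION & SPEC =====
-- Pre_ excludes exactly the inputs where some 'AK5' segment has no earlier 'AK2' segment:
-- there Python A raises NameError (unbound ak2ak5Seg) and B raises ValueError (max of empty).
def Pre_split_segs (file : String) : Prop :=
  let lines := pvSplit file "~"
  ∀ i < lines.length, pvTag lines[i]! = "AK5" → ∃ j < i, pvTag lines[j]! = "AK2"
instance (file : String) : Decidable (Pre_split_segs file) := by unfold Pre_split_segs; infer_instance
def pvWitness_split_segs : String := "A^1~AK2^x~AK5^ y~B^z"

def Spec_split_segs (file : String) (out : List (Int × List String)) : Prop := out = split_segs_alt file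
instance (file : String) (out : List (Int × List String)) : Decidable (Spec_split_segs file out) := by unfold Spec_split_segs; infer_instance

-- ===== CLAIM (what is proved, stated in full; the proofs are below) =====
def Claim_equal_split_segs : Prop := ∀ (file : String), Dom_split_segs file → Pre_split_segs file → Spec_split_segs file (split_segs file)

-- ===== LEMMAS AND PROOFS =====

-- the cleaned field list of a stored segment string
def pvFields (s : String) : List String :=
  (pvSplit s "^").map (fun f => PySem.Str.replace f " " "")

-- the key list 1, 2, …, n (as Ints)
def pvKeys (n : Nat) : List Int := (List.range n).map (fun j => ((1 + j : Nat) : Int))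

-- index of the last 'AK2' line strictly before i (B's max-computation, over pvTag)
def pvLast (lines : List String) (i : Nat) : Option Nat :=
  PySem.List.max? ((List.range i).filter (fun k => pvTag lines[k]! == "AK2")) (fun y => y)

-- the merged string for an AK5 at index i whose last preceding AK2 is at j:
-- lines[j] followed by the AK5 lines with index in (j, i]
def pvJoinUpTo (lines : List String) (i j : Nat) : String :=
  pvJoinCaret (lines[j]! ::
    ((List.range' (j + 1) (i - j)).filter (fun k => pvTag lines[k]! == "AK5")).map
      (fun k => lines[k]!))

-- closed form of A's buffer variable after processing the first m lines
def pvBufCF (lines : List String) (m : Nat) : Option String :=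
  (pvLast lines m).map (fun j => pvJoinUpTo lines (m - 1) j)

-- B's loop body, phrased over pvTag (the port's tags[_]! is rewritten to this)
def pvStepB (lines : List String) (e : PySem.Dict Int (List String)) (i : Nat) :
    PySem.Dict Int (List String) :=
  if pvTag lines[i]! == "AK2" then e
  else
    let s :=
      if pvTag lines[i]! == "AK5" then
        match pvLast lines i with
        | some j => pvJoinUpTo lines i j
        | none => lines[i]!
      else lines[i]!
    e.insert ((e.size : Int) + 1) (pvFields s)

lemma pv_foldl_range (f : PySem.Dict Int String × Option String → String →
      PySem.Dict Int String × Option String) (l : List String)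
    (a : PySem.Dict Int String × Option String) :
    l.foldl f a = (List.range l.length).foldl (fun st i => f st l[i]!) a := by
  induction l generalizing a with
  | nil => simp
  | cons x xs ih =>
    rw [List.foldl_cons, ih (f a x)]
    simp only [List.length_cons, List.range_succ_eq_map, List.foldl_cons, List.foldl_map,
      List.getElem!_cons_zero, List.getElem!_cons_succ]

lemma pv_foldl_max_eq (m : Nat) : ∀ (t : List Nat) (x : Nat), x ≤ m → (∀ y ∈ t, y ≤ m) →
    (t ++ [m]).foldl max x = m := by
  intro t
  induction t with
  | nil => intro x hx _; simpa [Nat.max_eq_right hx]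
  | cons y ys ih =>
    intro x hx hall
    rw [List.cons_append, List.foldl_cons]
    exact ih (max x y) (by simp [hx, hall y (by simp)]) (fun z hz => hall z (by simp [hz]))

lemma pv_max_append (l : List Nat) (m : Nat) (h : ∀ x ∈ l, x ≤ m) :
    PySem.List.max? (l ++ [m]) (fun y => y) = some m := by
  cases l with
  | nil => simp [PySem.List.max?_id_cons]
  | cons x t =>
    rw [List.cons_append, PySem.List.max?_id_cons]
    rw [pv_foldl_max_eq m t x (h x (by simp)) (fun y hy => h y (by simp [hy]))]

-- pvLast step: an AK2 at m becomes the new last index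
lemma pvLast_AK2 (lines : List String) (m : Nat) (h : pvTag lines[m]! = "AK2") :
    pvLast lines (m + 1) = some m := by
  unfold pvLast
  rw [List.range_succ, List.filter_append]
  rw [show (List.filter (fun k => pvTag lines[k]! == "AK2") [m]) = [m] by
    simp only [List.filter_cons, List.filter_nil]
    rw [if_pos (by simpa using h)]]
  exact pv_max_append _ m (fun x hx => by
    have := List.mem_range.mp (List.mem_of_mem_filter hx); omega)

-- pvLast step: a non-AK2 at m leaves it unchanged
lemma pvLast_skip (lines : List String) (m : Nat) (h : ¬ pvTag lines[m]! = "AK2") :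
    pvLast lines (m + 1) = pvLast lines m := by
  unfold pvLast
  rw [List.range_succ, List.filter_append]
  rw [show (List.filter (fun k => pvTag lines[k]! == "AK2") [m]) = [] by
    simp only [List.filter_cons, List.filter_nil]
    rw [if_neg (by simpa using h)]]
  rw [List.append_nil]

lemma pvLast_lt (lines : List String) (m j : Nat) (h : pvLast lines m = some j) : j < m := by
  have := PySem.List.max?_mem h
  exact List.mem_range.mp (List.mem_of_mem_filter this)

lemma pvLast_isSome (lines : List String) (m j : Nat) (hj : j < m)
    (hA : pvTag lines[j]! = "AK2") : ∃ j', pvLast lines m = some j' := by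
  cases hl : pvLast lines m with
  | some j' => exact ⟨j', rfl⟩
  | none =>
    have : ((List.range m).filter (fun k => pvTag lines[k]! == "AK2")) = [] :=
      (PySem.List.max?_eq_none_iff _ _).mp hl
    have hmem : j ∈ (List.range m).filter (fun k => pvTag lines[k]! == "AK2") :=
      List.mem_filter.mpr ⟨List.mem_range.mpr hj, by simpa using hA⟩
    rw [this] at hmem
    cases hmem

lemma pvJoinCaret_concat (x y : String) (l : List String) :
    pvJoinCaret (x :: (l ++ [y])) = pvJoinCaret (x :: l) ++ "^" ++ y := by
  induction l generalizing x with
  | nil => rfl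
  | cons z t ih =>
    rw [List.cons_append]
    show x ++ "^" ++ pvJoinCaret (z :: (t ++ [y])) = pvJoinCaret (x :: z :: t) ++ "^" ++ y
    rw [ih z]
    show _ = x ++ "^" ++ pvJoinCaret (z :: t) ++ "^" ++ y
    simp [String.append_assoc]

-- pvJoinUpTo step: an AK5 at m is appended to the merged string
lemma pvJoin_AK5 (lines : List String) (m j : Nat) (hj : j < m)
    (h5 : pvTag lines[m]! = "AK5") :
    pvJoinUpTo lines m j = pvJoinUpTo lines (m - 1) j ++ "^" ++ lines[m]! := by
  unfold pvJoinUpTo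
  have hrange : List.range' (j + 1) (m - j) = List.range' (j + 1) (m - 1 - j) ++ [m] := by
    have h1 : m - j = (m - 1 - j) + 1 := by omega
    rw [h1, List.range'_concat, show j + 1 + 1 * (m - 1 - j) = m by omega]
  rw [hrange, List.filter_append]
  rw [show (List.filter (fun k => pvTag lines[k]! == "AK5") [m]) = [m] by
    simp only [List.filter_cons, List.filter_nil]
    rw [if_pos (by simpa using h5)]]
  rw [List.map_append, List.map_cons, List.map_nil]
  exact pvJoinCaret_concat _ _ _

-- pvJoinUpTo step: a non-AK5 at m leaves the merged string unchanged
lemma pvJoin_skip (lines : List String) (m j : Nat) (hj : j < m)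
    (h5 : ¬ pvTag lines[m]! = "AK5") :
    pvJoinUpTo lines m j = pvJoinUpTo lines (m - 1) j := by
  unfold pvJoinUpTo
  have hrange : List.range' (j + 1) (m - j) = List.range' (j + 1) (m - 1 - j) ++ [m] := by
    have h1 : m - j = (m - 1 - j) + 1 := by omega
    rw [h1, List.range'_concat, show j + 1 + 1 * (m - 1 - j) = m by omega]
  rw [hrange, List.filter_append]
  rw [show (List.filter (fun k => pvTag lines[k]! == "AK5") [m]) = [] by
    simp only [List.filter_cons, List.filter_nil]
    rw [if_neg (by simpa using h5)]]
  rw [List.append_nil]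

lemma foldl_append_map (g : String → String) (l : List String) (acc : List String) :
    l.foldl (fun fs x => fs ++ [g x]) acc = acc ++ l.map g := by
  induction l generalizing acc with
  | nil => simp
  | cons x xs ih => simp [ih]

lemma pvKeys_succ (n : Nat) : pvKeys (n + 1) = pvKeys n ++ [((1 + n : Nat) : Int)] := by
  simp [pvKeys, List.range_succ]

lemma pvKeys_nodup (n : Nat) : (pvKeys n).Nodup := by
  exact List.Nodup.map (fun a b h => by omega) (List.nodup_range)

-- a dict whose keys are 1, 2, … does not contain the next key
lemma pvFresh {ν : Type} (d : PySem.Dict Int ν)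
    (hkeys : d.items.map Prod.fst = pvKeys d.size) :
    d.contains ((d.size : Int) + 1) = false := by
  rw [PySem.Dict.contains_eq_decide_mem_keys]
  simp only [decide_eq_false_iff_not]
  intro hmem
  have : ((d.size : Int) + 1) ∈ d.items.map Prod.fst := by
    simpa [PySem.Dict.keys] using hmem
  rw [hkeys] at this
  simp only [pvKeys, List.mem_map, List.mem_range] at this
  obtain ⟨j, hj, heq⟩ := this
  omega

-- main invariant: after m steps A's buffer is the closed form, A's keys are 1..size,
-- and B's dict is A's dict with the fields map applied
lemma pvMain (lines : List String)
    (hpre : ∀ i < lines.length, pvTag lines[i]! = "AK5" → ∃ j < i, pvTag lines[j]! = "AK2")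
    (m : Nat) (hm : m ≤ lines.length) :
    ((List.range m).foldl (fun st i => pvStepA st lines[i]!) (PySem.Dict.empty, none)).2
        = pvBufCF lines m ∧
    ((List.range m).foldl (fun st i => pvStepA st lines[i]!) (PySem.Dict.empty, none)).1.items.map Prod.fst
        = pvKeys ((List.range m).foldl (fun st i => pvStepA st lines[i]!) (PySem.Dict.empty, none)).1.size ∧
    ((List.range m).foldl (pvStepB lines) PySem.Dict.empty).items
        = ((List.range m).foldl (fun st i => pvStepA st lines[i]!) (PySem.Dict.empty, none)).1.items.map
            (fun p => (p.1, pvFields p.2)) := by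
  induction m with
  | zero =>
    refine ⟨rfl, ?_, ?_⟩ <;>
      simp [pvBufCF, pvLast, pvKeys,
        show (PySem.Dict.empty : PySem.Dict Int String).items = [] from rfl,
        show (PySem.Dict.empty : PySem.Dict Int (List String)).items = [] from rfl,
        show (PySem.Dict.empty : PySem.Dict Int String).size = 0 from rfl]
  | succ m ih =>
    obtain ⟨hbuf, hkeys, hitems⟩ := ih (by omega)
    set d := ((List.range m).foldl (fun st i => pvStepA st lines[i]!) (PySem.Dict.empty, none)).1 with hd
    set buf := ((List.range m).foldl (fun st i => pvStepA st lines[i]!) (PySem.Dict.empty, none)).2 with hb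
    set e := ((List.range m).foldl (pvStepB lines) PySem.Dict.empty) with he
    have hstA : (List.range (m+1)).foldl (fun st i => pvStepA st lines[i]!) (PySem.Dict.empty, none)
        = pvStepA (d, buf) lines[m]! := by
      rw [List.range_succ, List.foldl_append, List.foldl_cons, List.foldl_nil, hd, hb]
    have hstB : (List.range (m+1)).foldl (pvStepB lines) PySem.Dict.empty
        = pvStepB lines e m := by
      rw [List.range_succ, List.foldl_append, List.foldl_cons, List.foldl_nil, he]
    -- freshness facts for both dicts
    have hesize : e.size = d.size := by
      show e.items.length = d.items.length
      rw [hitems]; simp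
    have hekeys : e.items.map Prod.fst = pvKeys e.size := by
      rw [hitems, hesize, List.map_map]
      simpa using hkeys
    have hinsA : ∀ s : String,
        ((d.insert ((d.size : Int) + 1) s).items = d.items ++ [((d.size : Int) + 1, s)]) :=
      fun s => PySem.Dict.items_insert_of_not_contains d s (pvFresh d hkeys)
    have hszA : ∀ s : String, (d.insert ((d.size : Int) + 1) s).size = d.size + 1 := by
      intro s
      show (d.insert ((d.size : Int) + 1) s).items.length = d.items.length + 1
      rw [hinsA s]; simp
    have hkeysA : ∀ s : String,
        (d.insert ((d.size : Int) + 1) s).items.map Prod.fst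
          = pvKeys (d.insert ((d.size : Int) + 1) s).size := by
      intro s
      rw [hszA s, pvKeys_succ, hinsA s]
      simp only [List.map_append, List.map_cons, List.map_nil, hkeys]
      congr 1
      simp
      omega
    have hinsB : ∀ v : List String,
        ((e.insert ((e.size : Int) + 1) v).items = e.items ++ [((e.size : Int) + 1, v)]) :=
      fun v => PySem.Dict.items_insert_of_not_contains e v (pvFresh e hekeys)
    by_cases h2 : pvTag lines[m]! = "AK2"
    · rw [hstA, hstB]
      have hA : pvStepA (d, buf) lines[m]! = (d, some lines[m]!) := by
        unfold pvStepA; rw [if_pos (by simpa using h2)]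
      have hB : pvStepB lines e m = e := by
        unfold pvStepB; rw [if_pos (by simpa using h2)]
      rw [hA, hB]
      refine ⟨?_, hkeys, hitems⟩
      rw [pvBufCF, pvLast_AK2 lines m h2]
      simp only [Option.map_some]
      unfold pvJoinUpTo
      rw [Nat.add_sub_cancel, Nat.sub_self]
      rfl
    · by_cases h5 : pvTag lines[m]! = "AK5"
      · obtain ⟨j0, hj0, hA2⟩ := hpre m (by omega) h5
        obtain ⟨j, hjeq⟩ := pvLast_isSome lines m j0 hj0 hA2
        have hjlt : j < m := pvLast_lt lines m j hjeq
        have hbufv : buf = some (pvJoinUpTo lines (m - 1) j) := by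
          rw [hbuf, pvBufCF, hjeq]; rfl
        rw [hstA, hstB]
        have hA : pvStepA (d, buf) lines[m]!
            = (d.insert ((d.size : Int) + 1)
                 (pvJoinUpTo lines (m - 1) j ++ "^" ++ lines[m]!),
               some (pvJoinUpTo lines (m - 1) j ++ "^" ++ lines[m]!)) := by
          rw [hbufv]
          unfold pvStepA
          rw [if_neg (by simpa using h2), if_pos (by simpa using h5)]
        have hsval : pvJoinUpTo lines m j = pvJoinUpTo lines (m - 1) j ++ "^" ++ lines[m]! :=
          pvJoin_AK5 lines m j hjlt h5
        have hB : pvStepB lines e m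
            = e.insert ((e.size : Int) + 1) (pvFields (pvJoinUpTo lines m j)) := by
          unfold pvStepB
          rw [if_neg (by simpa using h2), if_pos (by simpa using h5), hjeq]
        rw [hA, hB]
        refine ⟨?_, hkeysA _, ?_⟩
        · show some _ = pvBufCF lines (m + 1)
          rw [pvBufCF, pvLast_skip lines m h2, hjeq]
          simp only [Option.map_some, Nat.add_sub_cancel]
          rw [hsval]
        · rw [hinsB, hinsA, hitems, List.map_append, hesize, hsval]
          simp
      · rw [hstA, hstB]
        have hA : pvStepA (d, buf) lines[m]!
            = (d.insert ((d.size : Int) + 1) lines[m]!, buf) := by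
          unfold pvStepA
          rw [if_neg (by simpa using h2), if_neg (by simpa using h5)]
        have hB : pvStepB lines e m
            = e.insert ((e.size : Int) + 1) (pvFields lines[m]!) := by
          unfold pvStepB
          rw [if_neg (by simpa using h2), if_neg (by simpa using h5)]
        rw [hA, hB]
        refine ⟨?_, hkeysA _, ?_⟩
        · rw [hbuf, pvBufCF, pvBufCF, pvLast_skip lines m h2]
          cases hl : pvLast lines m with
          | none => simp
          | some j =>
            have hjlt : j < m := pvLast_lt lines m j hl
            simp only [Option.map_some, Nat.add_sub_cancel]
            rw [pvJoin_skip lines m j hjlt h5]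
        · rw [hinsB, hinsA, hitems, List.map_append, hesize]
          simp
-- A's second loop over a dict with the 1..n keys is a map over its items
lemma pvPass2 (d : PySem.Dict Int String)
    (hkeys : d.items.map Prod.fst = pvKeys d.size) :
    (d.keys.foldl
      (fun (out : PySem.Dict Int (List String)) key =>
        out.insert key
          ((pvSplit ((d.get? key).getD "") "^").foldl
            (fun fs x => fs ++ [PySem.Str.replace x " " ""]) [])) PySem.Dict.empty).items
      = d.items.map (fun p => (p.1, pvFields p.2)) := by
  have hkd : d.keys = pvKeys d.size := by simpa [PySem.Dict.keys] using hkeys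
  have hnd : d.keys.Nodup := by rw [hkd]; exact pvKeys_nodup _
  have hfresh : ∀ a ∈ d.keys,
      (PySem.Dict.empty : PySem.Dict Int (List String)).contains a = false := by
    intro a _; exact PySem.Dict.contains_empty a
  have := PySem.Dict.items_foldl_insert_fresh (l := d.keys) (k := fun a => a)
    (v := fun key => ((pvSplit ((d.get? key).getD "") "^").foldl
      (fun fs x => fs ++ [PySem.Str.replace x " " ""]) []))
    (d := PySem.Dict.empty) hfresh (by simpa using hnd)
  rw [this]
  have hitems : d.items = d.keys.map (fun k => (k, d.getD k "")) :=
    PySem.Dict.items_eq_map_keys d hnd ""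
  conv_rhs => rw [hitems]
  rw [List.map_map]
  simp only [show (PySem.Dict.empty : PySem.Dict Int (List String)).items = [] from rfl,
    List.nil_append]
  apply List.map_congr_left
  intro k hk
  simp only [Function.comp]
  rw [foldl_append_map]
  simp [pvFields, PySem.Dict.getD_eq_get?_getD]

-- the port of B (with tags[_]! over the precomputed tag list) computes pvStepB at
-- every index of range n
lemma pvStepB_port (lines : List String) (i : Nat) (hi : i < lines.length)
    (e : PySem.Dict Int (List String)) :
    (if (lines.map (fun s => (pvSplit s "^").head?.getD ""))[i]! == "AK2" then e
     else
       let s :=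
         if (lines.map (fun s => (pvSplit s "^").head?.getD ""))[i]! == "AK5" then
           match PySem.List.max? ((List.range i).filter
               (fun k => (lines.map (fun s => (pvSplit s "^").head?.getD ""))[k]! == "AK2"))
               (fun y => y) with
           | some j =>
               pvJoinCaret (lines[j]! ::
                 ((List.range' (j + 1) (i - j)).filter
                     (fun k => (lines.map (fun s => (pvSplit s "^").head?.getD ""))[k]! == "AK5")).map
                   (fun k => lines[k]!))
           | none => lines[i]!
         else lines[i]!
       e.insert ((e.size : Int) + 1)
         ((pvSplit s "^").map (fun f => PySem.Str.replace f " " "")))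
      = pvStepB lines e i := by
  have htag : ∀ k, k < lines.length →
      (lines.map (fun s => (pvSplit s "^").head?.getD ""))[k]! = pvTag lines[k]! := by
    intro k hk
    rw [getElem!_pos (lines.map _) k (by simpa using hk), getElem!_pos lines k hk,
      List.getElem_map]
    rfl
  have hf2 : (List.range i).filter
        (fun k => (lines.map (fun s => (pvSplit s "^").head?.getD ""))[k]! == "AK2")
      = (List.range i).filter (fun k => pvTag lines[k]! == "AK2") := by
    apply List.filter_congr
    intro k hk
    rw [htag k (by have := List.mem_range.mp hk; omega)]
  unfold pvStepB
  dsimp only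
  rw [htag i hi, hf2]
  by_cases h2 : (pvTag lines[i]! == "AK2") = true
  · rw [if_pos h2, if_pos h2]
  · rw [if_neg h2, if_neg h2]
    by_cases h5 : (pvTag lines[i]! == "AK5") = true
    · rw [if_pos h5, if_pos h5]
      cases hl : pvLast lines i with
      | none =>
        rw [show PySem.List.max? ((List.range i).filter (fun k => pvTag lines[k]! == "AK2"))
            (fun y => y) = none from hl]
        rfl
      | some j =>
        have hj : j < i := pvLast_lt lines i j hl
        have hf3 : (List.range' (j + 1) (i - j)).filter
              (fun k => (lines.map (fun s => (pvSplit s "^").head?.getD ""))[k]! == "AK5")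
            = (List.range' (j + 1) (i - j)).filter (fun k => pvTag lines[k]! == "AK5") := by
          apply List.filter_congr
          intro k hk
          have hk' := List.mem_range'_1.mp hk
          rw [htag k (by omega)]
        rw [show PySem.List.max? ((List.range i).filter (fun k => pvTag lines[k]! == "AK2"))
            (fun y => y) = some j from hl]
        dsimp only
        rw [hf3]
        rfl
    · rw [if_neg h5, if_neg h5]
      rfl

-- ===== VERDICT (by name: the statement is the Claim_ definition above) =====
set_option maxHeartbeats 2000000 in
theorem split_segs_spec : Claim_equal_split_segs := by
  intro file _ hpre
  unfold Spec_split_segs split_segs split_segs_alt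
  have hpre' : ∀ i < (pvSplit file "~").length, pvTag (pvSplit file "~")[i]! = "AK5" →
      ∃ j < i, pvTag (pvSplit file "~")[j]! = "AK2" := hpre
  obtain ⟨hbuf, hkeys, hitems⟩ :=
    pvMain (pvSplit file "~") hpre' (pvSplit file "~").length (le_refl _)
  dsimp only
  rw [pv_foldl_range]
  rw [pvPass2 _ hkeys]
  rw [← hitems]
  congr 1
  apply PySem.List.foldl_congr_mem
  intro acc i hi
  exact (pvStepB_port (pvSplit file "~") i (List.mem_range.mp hi) acc).symm
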